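-- pv_equiv track=rewrite | github.com/tassilucas/advent-of-code | p2/sol2.py | analyse_report
-- ===== SOURCE A (Python) =====
-- def analyse_report(report):
--     # mark if is descending or ascending
--     ascending = False
--     if report[0] > report[1]:
--         ascending = False
--     elif report[0] < report[1]:
--         ascending = True
--     else:
--         return False
--
--     last = report[0]
--     safe = True
--     for level in report[1:]:
--         # last < level
--         if ascending:
--             if level <= last or (level - last < 1 or level - last > 3):
--                 safe = False
--         # last > level
--         else:
--             if level >= last or (last - level < 1 or last - level > 3):
--                 safe = False
--
--         last = level
--
--     return safe
-- ===== SOURCE B (Python) =====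
-- def analyse_report(report):
--     diffs = [b - a for a, b in zip(report, report[1:])]
--     return all(1 <= d <= 3 for d in diffs) or all(-3 <= d <= -1 for d in diffs)
-- ===== Notes on version B (the rewrite author's own statement) =====
-- stated objective: idiomatic
-- what changed: Replaces A's direction-flag single pass with inline per-direction checks by building the list of consecutive differences and applying two uniform range tests (all 1..3 or all -3..-1).
import Mathlib
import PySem

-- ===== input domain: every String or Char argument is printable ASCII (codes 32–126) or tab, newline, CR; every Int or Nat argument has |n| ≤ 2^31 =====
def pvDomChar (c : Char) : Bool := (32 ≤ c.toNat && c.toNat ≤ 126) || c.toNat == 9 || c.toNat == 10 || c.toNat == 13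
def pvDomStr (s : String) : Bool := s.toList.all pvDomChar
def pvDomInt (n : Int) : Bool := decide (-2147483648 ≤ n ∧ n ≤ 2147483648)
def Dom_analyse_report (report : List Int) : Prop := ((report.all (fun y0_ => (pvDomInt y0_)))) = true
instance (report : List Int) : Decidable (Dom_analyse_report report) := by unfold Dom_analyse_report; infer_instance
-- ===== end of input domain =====

-- B replaces A's direction-flag single pass by a list of consecutive differences
-- plus two uniform range tests (idiomatic decomposition; same cost).


-- ===== PORT A =====
-- A's loop body: state is (last, safe); ascending flag fixed over the loop.
def aStep (ascending : Bool) (st : Int × Bool) (level : Int) : Int × Bool :=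
  if ascending then
    if level ≤ st.1 ∨ level - st.1 < 1 ∨ level - st.1 > 3 then (level, false) else (level, st.2)
  else
    if level ≥ st.1 ∨ st.1 - level < 1 ∨ st.1 - level > 3 then (level, false) else (level, st.2)

def analyse_report (report : List Int) : Bool :=
  match report with
  | r0 :: r1 :: rest =>
    if r0 > r1 then ((r1 :: rest).foldl (aStep false) (r0, true)).2
    else if r0 < r1 then ((r1 :: rest).foldl (aStep true) (r0, true)).2
    else false
  | _ => false  -- unreachable under Pre_analyse_report (Python raises IndexError)

-- ===== PORT B =====
def analyse_report_alt (report : List Int) : Bool :=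
  let diffs := (report.zip report.tail).map (fun p => p.2 - p.1)
  diffs.all (fun d => decide (1 ≤ d) && decide (d ≤ 3)) ||
  diffs.all (fun d => decide (-3 ≤ d) && decide (d ≤ -1))

-- ===== PRECONDITION & SPEC =====
-- Pre_ excludes reports with fewer than 2 elements: Python A raises IndexError there
-- (report[1] access); B returns True there (empty difference list is vacuously safe).
def Pre_analyse_report (report : List Int) : Prop := 2 ≤ report.length
instance (report : List Int) : Decidable (Pre_analyse_report report) := by unfold Pre_analyse_report; infer_instance
def pvWitness_analyse_report : List Int := [1, 2]

def Spec_analyse_report (report : List Int) (out : Bool) : Prop := out = analyse_report_alt report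
instance (report : List Int) (out : Bool) : Decidable (Spec_analyse_report report out) := by unfold Spec_analyse_report; infer_instance

-- ===== CLAIM (what is proved, stated in full; the proofs are below) =====
def Claim_equal_analyse_report : Prop := ∀ (report : List Int), Dom_analyse_report report → Pre_analyse_report report → Spec_analyse_report report (analyse_report report)

-- ===== LEMMAS AND PROOFS =====

-- chained "each step up by 1..3" / "down by 1..3" predicates
def chainUp : Int → List Int → Bool
  | _, [] => true
  | last, l :: ls => (decide (1 ≤ l - last) && decide (l - last ≤ 3)) && chainUp l ls

def chainDown : Int → List Int → Bool
  | _, [] => true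
  | last, l :: ls => (decide (-3 ≤ l - last) && decide (l - last ≤ -1)) && chainDown l ls

theorem foldl_aStep_true (ls : List Int) : ∀ (last : Int) (safe : Bool),
    (ls.foldl (aStep true) (last, safe)).2 = (safe && chainUp last ls) := by
  induction ls with
  | nil => intro last safe; simp [chainUp]
  | cons l ls ih =>
    intro last safe
    simp only [List.foldl_cons, chainUp]
    have step : aStep true (last, safe) l =
        (l, (decide (1 ≤ l - last) && decide (l - last ≤ 3)) && safe) := by
      by_cases h : l ≤ last ∨ l - last < 1 ∨ l - last > 3
      · simp [aStep, h]
        intro h1 h2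
        exact (by omega : False).elim
      · simp [aStep, h]
        intro _
        omega
    rw [step, ih]
    cases safe <;> cases h : chainUp l ls <;> simp [Bool.and_comm]

theorem foldl_aStep_false (ls : List Int) : ∀ (last : Int) (safe : Bool),
    (ls.foldl (aStep false) (last, safe)).2 = (safe && chainDown last ls) := by
  induction ls with
  | nil => intro last safe; simp [chainDown]
  | cons l ls ih =>
    intro last safe
    simp only [List.foldl_cons, chainDown]
    have step : aStep false (last, safe) l =
        (l, (decide (-3 ≤ l - last) && decide (l - last ≤ -1)) && safe) := by
      by_cases h : l ≥ last ∨ last - l < 1 ∨ last - l > 3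
      · simp [aStep, h]
        intro h1 h2
        exact (by omega : False).elim
      · simp [aStep, h]
        intro _
        omega
    rw [step, ih]
    cases safe <;> cases h : chainDown l ls <;> simp [Bool.and_comm]

theorem zip_all_up (ls : List Int) : ∀ (last : Int),
    (((last :: ls).zip ls).map (fun p => p.2 - p.1)).all
      (fun d => decide (1 ≤ d) && decide (d ≤ 3)) = chainUp last ls := by
  induction ls with
  | nil => intro last; simp [chainUp]
  | cons l ls ih => intro last; simp [chainUp, ih l]

theorem zip_all_down (ls : List Int) : ∀ (last : Int),
    (((last :: ls).zip ls).map (fun p => p.2 - p.1)).all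
      (fun d => decide (-3 ≤ d) && decide (d ≤ -1)) = chainDown last ls := by
  induction ls with
  | nil => intro last; simp [chainDown]
  | cons l ls ih => intro last; simp [chainDown, ih l]

-- ===== VERDICT (by name: the statement is the Claim_ definition above) =====
theorem analyse_report_spec : Claim_equal_analyse_report := by
  intro report _ hpre
  unfold Spec_analyse_report
  match report with
  | [] => simp [Pre_analyse_report] at hpre
  | [_] => simp [Pre_analyse_report] at hpre
  | r0 :: r1 :: rest =>
    show analyse_report (r0 :: r1 :: rest) = analyse_report_alt (r0 :: r1 :: rest)
    unfold analyse_report analyse_report_alt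
    simp only [List.tail_cons, zip_all_up (r1 :: rest) r0, zip_all_down (r1 :: rest) r0]
    rcases lt_trichotomy r0 r1 with h | h | h
    · rw [if_neg (by omega), if_pos h, foldl_aStep_true]
      have hd : chainDown r0 (r1 :: rest) = false := by
        simp [chainDown]; intro h1 h2; omega
      simp [hd]
    · rw [if_neg (by omega), if_neg (by omega)]
      have hu : chainUp r0 (r1 :: rest) = false := by
        simp [chainUp]; intro h1 h2; omega
      have hd : chainDown r0 (r1 :: rest) = false := by
        simp [chainDown]; intro h1 h2; omega
      simp [hu, hd]
    · rw [if_pos h, foldl_aStep_false]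
      have hu : chainUp r0 (r1 :: rest) = false := by
        simp [chainUp]; intro h1 h2; omega
      simp [hu]
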